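-- pv_equiv track=rewrite | github.com/mmoscosa/theo | src/theo/crew.py | _is_schema_change
-- ===== SOURCE A (Python) =====
-- def _is_schema_change(diff_text):
--     """
--     Analyze diff text to determine if it contains schema changes.
--     """
--     schema_indicators = [
--         "@Column", "@ManyToOne", "@OneToMany", "@Entity", "@Table",
--         "export interface", "export class", "export enum",
--         "extends BaseEntity", "extends Entity",
--         "database", "schema", "migration", "model"
--     ]
--
--     return any(indicator in diff_text for indicator in schema_indicators)
-- ===== SOURCE B (Python) =====
-- # Dispatch on the first character: indicators grouped by first letter, so at
-- # each position at most one small group of tail-checks runs.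
-- _BY_FIRST = {
--     "@": ("Column", "ManyToOne", "OneToMany", "Entity", "Table"),
--     "e": ("xport interface", "xport class", "xport enum",
--           "xtends BaseEntity", "xtends Entity"),
--     "d": ("atabase",),
--     "s": ("chema",),
--     "m": ("igration", "odel"),
-- }
--
-- def _is_schema_change(diff_text):
--     for i, ch in enumerate(diff_text):
--         rests = _BY_FIRST.get(ch)
--         if rests is not None and any(diff_text.startswith(r, i + 1) for r in rests):
--             return True
--     return False
-- ===== Notes on version B (the rewrite author's own statement) =====
-- stated objective: alternative
-- what changed: Replaced any() over 14 independent full-text substring scans with a single left-to-right pass that dispatches on the current character via a first-letter index and only checks the matching group's tails.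
import Mathlib
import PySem

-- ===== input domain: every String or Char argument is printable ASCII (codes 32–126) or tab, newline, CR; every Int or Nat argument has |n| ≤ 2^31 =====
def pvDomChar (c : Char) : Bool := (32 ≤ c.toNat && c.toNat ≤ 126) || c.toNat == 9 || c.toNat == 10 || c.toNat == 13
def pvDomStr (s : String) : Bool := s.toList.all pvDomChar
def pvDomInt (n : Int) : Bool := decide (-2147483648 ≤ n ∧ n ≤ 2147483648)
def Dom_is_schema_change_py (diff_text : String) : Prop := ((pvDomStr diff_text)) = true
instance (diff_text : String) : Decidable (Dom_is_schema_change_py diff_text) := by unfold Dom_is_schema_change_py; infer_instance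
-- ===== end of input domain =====

-- B replaces A's 14 independent full-text substring scans by one left-to-right pass that dispatches on the current character (indicators grouped by first letter) — alternative algorithm, same result.


-- ===== PORT A =====
-- A's literal indicator list
def pvIndicators : List (List Char) :=
  ["@Column".toList, "@ManyToOne".toList, "@OneToMany".toList, "@Entity".toList, "@Table".toList,
   "export interface".toList, "export class".toList, "export enum".toList,
   "extends BaseEntity".toList, "extends Entity".toList,
   "database".toList, "schema".toList, "migration".toList, "model".toList]

-- A: any(indicator in diff_text for indicator in schema_indicators)
def is_schema_change_py (diff_text : String) : Bool :=
  pvIndicators.any (fun ind => PySem.Chars.isIn ind diff_text.toList)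

-- ===== PORT B =====
-- B's per-position dispatch: given the character at the position and the rest of
-- the text, check only the tails of the group selected by the first letter.
def pvDispatch (c : Char) (t : List Char) : Bool :=
  if c = '@' then
    PySem.Chars.startswith t "Column".toList || PySem.Chars.startswith t "ManyToOne".toList ||
    PySem.Chars.startswith t "OneToMany".toList || PySem.Chars.startswith t "Entity".toList ||
    PySem.Chars.startswith t "Table".toList
  else if c = 'e' then
    PySem.Chars.startswith t "xport interface".toList || PySem.Chars.startswith t "xport class".toList ||
    PySem.Chars.startswith t "xport enum".toList || PySem.Chars.startswith t "xtends BaseEntity".toList ||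
    PySem.Chars.startswith t "xtends Entity".toList
  else if c = 'd' then PySem.Chars.startswith t "atabase".toList
  else if c = 's' then PySem.Chars.startswith t "chema".toList
  else if c = 'm' then PySem.Chars.startswith t "igration".toList || PySem.Chars.startswith t "odel".toList
  else false

-- B: one pass over the text, dispatching at each position
def pvScanB : List Char → Bool
  | [] => false
  | c :: t => pvDispatch c t || pvScanB t

def is_schema_change_py_alt (diff_text : String) : Bool :=
  pvScanB diff_text.toList

-- ===== PRECONDITION & SPEC =====
def Spec_is_schema_change_py (diff_text : String) (out : Bool) : Prop := out = is_schema_change_py_alt diff_text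
instance (diff_text : String) (out : Bool) : Decidable (Spec_is_schema_change_py diff_text out) := by unfold Spec_is_schema_change_py; infer_instance

-- ===== CLAIM (what is proved, stated in full; the proofs are below) =====
def Claim_equal_is_schema_change_py : Prop := ∀ (diff_text : String), Dom_is_schema_change_py diff_text → Spec_is_schema_change_py diff_text (is_schema_change_py diff_text)

-- ===== LEMMAS AND PROOFS =====

-- peel one character off a startswith check
theorem sw_cons (c i : Char) (t r : List Char) :
    PySem.Chars.startswith (c :: t) (i :: r) = ((i = c : Bool) && PySem.Chars.startswith t r) := by
  by_cases h : (i :: r) <+: (c :: t)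
  · rcases List.cons_prefix_cons.mp h with ⟨he, hr⟩
    rw [(PySem.Chars.startswith_iff _ _).mpr h, (PySem.Chars.startswith_iff _ _).mpr hr]
    simp [he]
  · have h1 : PySem.Chars.startswith (c :: t) (i :: r) = false := by
      rw [← Bool.not_eq_true, PySem.Chars.startswith_iff]; exact h
    rw [h1]
    by_cases he : i = c
    · subst he
      have hr : ¬ r <+: t := fun hr => h (List.cons_prefix_cons.mpr ⟨rfl, hr⟩)
      have h2 : PySem.Chars.startswith t r = false := by
        rw [← Bool.not_eq_true, PySem.Chars.startswith_iff]; exact hr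
      simp [h2]
    · simp [he]

-- the dispatch at one position equals "some indicator starts here"
theorem dispatch_eq (c : Char) (t : List Char) :
    pvDispatch c t = pvIndicators.any (fun ind => PySem.Chars.startswith (c :: t) ind) := by
  simp only [pvIndicators, List.any_cons, List.any_nil,
    show "@Column".toList = '@' :: "Column".toList from rfl,
    show "@ManyToOne".toList = '@' :: "ManyToOne".toList from rfl,
    show "@OneToMany".toList = '@' :: "OneToMany".toList from rfl,
    show "@Entity".toList = '@' :: "Entity".toList from rfl,
    show "@Table".toList = '@' :: "Table".toList from rfl,
    show "export interface".toList = 'e' :: "xport interface".toList from rfl,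
    show "export class".toList = 'e' :: "xport class".toList from rfl,
    show "export enum".toList = 'e' :: "xport enum".toList from rfl,
    show "extends BaseEntity".toList = 'e' :: "xtends BaseEntity".toList from rfl,
    show "extends Entity".toList = 'e' :: "xtends Entity".toList from rfl,
    show "database".toList = 'd' :: "atabase".toList from rfl,
    show "schema".toList = 's' :: "chema".toList from rfl,
    show "migration".toList = 'm' :: "igration".toList from rfl,
    show "model".toList = 'm' :: "odel".toList from rfl,
    sw_cons]
  unfold pvDispatch
  split_ifs with h1 h2 h3 h4 h5
  · subst h1; simp; ac_rfl
  · subst h2; simp; ac_rfl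
  · subst h3; simp
  · subst h4; simp
  · subst h5; simp
  · simp
    refine ⟨?_, ?_, ?_, ?_, ?_, ?_, ?_, ?_, ?_, ?_, ?_, ?_, ?_, ?_⟩ <;>
      (intro h; exact absurd h.symm (by assumption))

-- the scan finds exactly the positions where some indicator is a prefix of a suffix
theorem pvScanB_true_iff (s : List Char) :
    pvScanB s = true ↔ ∃ ind ∈ pvIndicators, ∃ j, ind <+: s.drop j := by
  induction s with
  | nil =>
    simp only [pvScanB, List.drop_nil]
    constructor
    · intro h; cases h
    · rintro ⟨ind, hmem, _, hp⟩
      rw [List.prefix_nil] at hp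
      subst hp
      simp [pvIndicators] at hmem
  | cons c t ih =>
    rw [pvScanB, Bool.or_eq_true, ih, dispatch_eq, List.any_eq_true]
    constructor
    · rintro (⟨ind, hmem, hsw⟩ | ⟨ind, hmem, j, hp⟩)
      · exact ⟨ind, hmem, 0, by simpa using (PySem.Chars.startswith_iff _ _).mp hsw⟩
      · exact ⟨ind, hmem, j + 1, by simpa using hp⟩
    · rintro ⟨ind, hmem, j, hp⟩
      cases j with
      | zero => exact Or.inl ⟨ind, hmem, (PySem.Chars.startswith_iff _ _).mpr (by simpa using hp)⟩
      | succ j => exact Or.inr ⟨ind, hmem, j, by simpa using hp⟩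

-- ===== VERDICT (by name: the statement is the Claim_ definition above) =====
theorem is_schema_change_py_spec : Claim_equal_is_schema_change_py := by
  intro diff_text _
  unfold Spec_is_schema_change_py is_schema_change_py is_schema_change_py_alt
  by_cases hb : pvScanB diff_text.toList = true
  · rw [hb]
    rcases (pvScanB_true_iff diff_text.toList).mp hb with ⟨ind, hmem, j, hp⟩
    rw [List.any_eq_true]
    exact ⟨ind, hmem, (PySem.Chars.exists_prefix_drop_iff_isIn ind diff_text.toList).mp ⟨j, hp⟩⟩
  · rw [Bool.eq_false_iff.mpr hb, List.any_eq_false]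
    intro ind hmem hin
    apply hb
    rw [pvScanB_true_iff]
    rcases (PySem.Chars.exists_prefix_drop_iff_isIn ind diff_text.toList).mpr hin with ⟨j, hp⟩
    exact ⟨ind, hmem, j, hp⟩
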